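-- pv_equiv track=rewrite | github.com/tententgc/comsci-path | css223/final/facebookmini.py | recommendedfriend
-- ===== SOURCE A (Python) =====
-- def recommendedfriend(matrix, friend_num):
--     max_recommend = []
--     for i in range(len(matrix)):  # O(n)
--         count = 0
--         for j in range(len(matrix[i])):  #O(n)
--             if matrix[friend_num][j] == 1 and matrix[i][j] == 1 and i != friend_num and matrix[i][friend_num] == 0:  #O(1)
--                 count += 1
--
--         max_recommend.append(count)
--
--     return max_recommend.index(max(max_recommend)) #O(n)
-- ===== SOURCE B (Python) =====
-- def recommendedfriend(matrix, friend_num):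
--     # Column-wise accumulation: walk the target's row once and, for each common
--     # neighbour column j, add 1 to the whole score vector where column j is set;
--     # then mask out the target itself and existing friends, and take the first argmax.
--     scores = [0] * len(matrix)
--     for j, v in enumerate(matrix[friend_num]):
--         if v == 1:
--             scores = [s + (1 if j < len(row) and row[j] == 1 else 0)
--                       for s, row in zip(scores, matrix)]
--     scores = [0 if i == friend_num or row[friend_num] != 0 else s
--               for i, (s, row) in enumerate(zip(scores, matrix))]
--     return scores.index(max(scores))
-- ===== Notes on version B (the rewrite author's own statement) =====
-- stated objective: alternative
-- what changed: Inverts the loop nest: instead of counting common friends row by row per candidate, B walks the target's row once and scatter-accumulates the whole score vector column by column (one vector update per common-neighbour column), then zeroes self/existing friends in a separate masking pass before taking the first arg-max.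
-- outside the precondition, e.g. on recommendedfriend([[0], [0, 0]], 1): A returns 0, B raises IndexError
import Mathlib
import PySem

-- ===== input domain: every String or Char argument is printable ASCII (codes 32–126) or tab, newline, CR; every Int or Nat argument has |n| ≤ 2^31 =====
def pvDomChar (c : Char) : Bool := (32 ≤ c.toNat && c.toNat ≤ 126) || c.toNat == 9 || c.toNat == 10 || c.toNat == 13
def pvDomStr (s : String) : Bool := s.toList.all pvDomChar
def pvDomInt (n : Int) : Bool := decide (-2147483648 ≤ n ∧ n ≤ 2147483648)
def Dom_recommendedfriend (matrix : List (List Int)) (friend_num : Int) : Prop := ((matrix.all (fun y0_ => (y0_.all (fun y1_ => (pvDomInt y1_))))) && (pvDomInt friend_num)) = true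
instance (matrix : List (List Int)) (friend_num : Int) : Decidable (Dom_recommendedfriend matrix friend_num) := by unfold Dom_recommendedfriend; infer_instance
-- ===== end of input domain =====

-- B inverts A's loop nest: instead of counting, per candidate, the common 1-columns of its row,
-- it walks the target's row once and accumulates the whole score vector column by column,
-- then masks self/existing friends in a separate pass (alternative; same cost; return value only).

-- ===== PORT A =====
def recommendedfriend (matrix : List (List Int)) (friend_num : Int) : Int :=
  let max_recommend : List Int :=
    (PySem.List.pyRange 0 matrix.length 1).foldl (fun max_recommend i =>
      let count : Int :=
        (PySem.List.pyRange 0 ((PySem.List.pyGetD matrix i []).length : Int) 1).foldl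
          (fun count j =>
            if PySem.List.pyGetD (PySem.List.pyGetD matrix friend_num []) j 0 == 1
                && PySem.List.pyGetD (PySem.List.pyGetD matrix i []) j 0 == 1
                && i != friend_num
                && PySem.List.pyGetD (PySem.List.pyGetD matrix i []) friend_num 1 == 0
            then count + 1 else count) 0
      max_recommend ++ [count]) []
  match PySem.List.max? max_recommend (fun x => x) with
  | some m => (((PySem.List.index? max_recommend m).getD 0 : Nat) : Int)
  | none => 0   -- max([]) raises ValueError in Python; excluded by Pre_

-- ===== PORT B =====
def recommendedfriend_alt (matrix : List (List Int)) (friend_num : Int) : Int :=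
  let scores0 : List Int := List.replicate matrix.length 0
  let scores1 : List Int :=
    (PySem.List.enumerate (PySem.List.pyGetD matrix friend_num []) 0).foldl
      (fun scores p =>
        if p.2 = 1 then
          (scores.zip matrix).map (fun q =>
            q.1 + (if p.1 < (q.2.length : Int) ∧ PySem.List.pyGetD q.2 p.1 0 = 1 then 1 else 0))
        else scores) scores0
  let scores2 : List Int :=
    (PySem.List.enumerate (scores1.zip matrix) 0).map (fun q =>
      if q.1 = friend_num ∨ ¬ (PySem.List.pyGetD q.2.2 friend_num 1 = 0) then 0 else q.2.1)
  match PySem.List.max? scores2 (fun x => x) with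
  | some m => (((PySem.List.index? scores2 m).getD 0 : Nat) : Int)
  | none => 0

-- ===== PRECONDITION & SPEC =====
-- Pre_ excludes the inputs on which the Python A raises (empty matrix: ValueError; friend_num out
-- of range, or a row longer than the target's row: IndexError) together with the degenerate ragged
-- inputs on which A only returns because short-circuit evaluation skips an out-of-range
-- matrix[i][friend_num] access that any natural reimplementation performs (there B raises).
def Pre_recommendedfriend (matrix : List (List Int)) (friend_num : Int) : Prop :=
  matrix ≠ [] ∧ PySem.Raise.InRange matrix.length friend_num ∧
    ∀ p ∈ matrix.zipIdx,
      p.1.length ≤ (PySem.List.pyGetD matrix friend_num []).length ∧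
      ((p.2 : Int) = friend_num ∨ PySem.Raise.InRange p.1.length friend_num)
instance (matrix : List (List Int)) (friend_num : Int) : Decidable (Pre_recommendedfriend matrix friend_num) := by unfold Pre_recommendedfriend; infer_instance

def pvWitness_recommendedfriend : List (List Int) × Int := ([[0, 1], [1, 0]], 0)

def Spec_recommendedfriend (matrix : List (List Int)) (friend_num : Int) (out : Int) : Prop := out = recommendedfriend_alt matrix friend_num
instance (matrix : List (List Int)) (friend_num : Int) (out : Int) : Decidable (Spec_recommendedfriend matrix friend_num out) := by unfold Spec_recommendedfriend; infer_instance

-- ===== CLAIM (what is proved, stated in full; the proofs are below) =====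
def Claim_equal_recommendedfriend : Prop := ∀ (matrix : List (List Int)) (friend_num : Int), Dom_recommendedfriend matrix friend_num → Pre_recommendedfriend matrix friend_num → Spec_recommendedfriend matrix friend_num (recommendedfriend matrix friend_num)

-- ===== LEMMAS AND PROOFS =====

-- the per-column increment condition of B's scatter loop, for one row
def pvColCond (row : List Int) (p : Int × Int) : Bool :=
  decide (p.2 = 1) && decide (p.1 < (row.length : Int) ∧ PySem.List.pyGetD row p.1 0 = 1)

-- B's scatter loop keeps the score vector as long as the matrix …
lemma pv_scatter_len (matrix : List (List Int)) (ps : List (Int × Int)) :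
    ∀ (scores : List Int), scores.length = matrix.length →
      (ps.foldl (fun scores p =>
        if p.2 = 1 then
          (scores.zip matrix).map (fun q =>
            q.1 + (if p.1 < (q.2.length : Int) ∧ PySem.List.pyGetD q.2 p.1 0 = 1 then 1 else 0))
        else scores) scores).length = matrix.length := by
  induction ps with
  | nil => intro scores h; exact h
  | cons p ps ih =>
      intro scores h
      simp only [List.foldl_cons]
      apply ih
      split
      · simp [h]
      · exact h

-- … and each entry accumulates exactly the count of scatter steps that hit its row
lemma pv_scatter_getD (matrix : List (List Int)) (ps : List (Int × Int)) :
    ∀ (scores : List Int), scores.length = matrix.length →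
      ∀ (k : Nat), k < matrix.length →
        (ps.foldl (fun scores p =>
          if p.2 = 1 then
            (scores.zip matrix).map (fun q =>
              q.1 + (if p.1 < (q.2.length : Int) ∧ PySem.List.pyGetD q.2 p.1 0 = 1 then 1 else 0))
          else scores) scores).getD k 0
        = scores.getD k 0 + (ps.countP (pvColCond (matrix.getD k [])) : Int) := by
  induction ps with
  | nil => intro scores h k hk; simp
  | cons p ps ih =>
      intro scores h k hk
      simp only [List.foldl_cons]
      have hstep : (if p.2 = 1 then
          (scores.zip matrix).map (fun q =>
            q.1 + (if p.1 < (q.2.length : Int) ∧ PySem.List.pyGetD q.2 p.1 0 = 1 then 1 else 0))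
        else scores).length = matrix.length := by
        split
        · simp [h]
        · exact h
      rw [ih _ hstep k hk]
      have hks : k < scores.length := by omega
      by_cases hp : p.2 = 1
      · rw [if_pos hp]
        have hkz : k < ((scores.zip matrix).map (fun q =>
            q.1 + (if p.1 < (q.2.length : Int) ∧ PySem.List.pyGetD q.2 p.1 0 = 1 then 1 else 0))).length := by
          simp [h]; omega
        rw [List.getD_eq_getElem _ _ hkz, List.getElem_map, List.getElem_zip,
            List.getD_eq_getElem scores _ hks, List.getD_eq_getElem matrix ([]) hk] at *
        rw [List.countP_cons]
        unfold pvColCond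
        by_cases hc : p.1 < ((matrix[k]).length : Int) ∧ PySem.List.pyGetD (matrix[k]) p.1 0 = 1
        · simp [hc, hp]; ring
        · simp [hc, hp]
      · rw [if_neg hp, List.countP_cons]
        unfold pvColCond
        simp [hp]

-- the masked column-count of row k equals A's inner counting loop at i = k
lemma pv_col_eq_row (matrix : List (List Int)) (friend_num : Int) (k : Nat)
    (hlen : (matrix.getD k []).length ≤ (PySem.List.pyGetD matrix friend_num []).length) :
    (if (k : Int) = friend_num ∨ ¬ (PySem.List.pyGetD (matrix.getD k []) friend_num 1 = 0)
     then 0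
     else (((PySem.List.enumerate (PySem.List.pyGetD matrix friend_num []) 0).countP
              (pvColCond (matrix.getD k [])) : Nat) : Int))
    = (PySem.List.pyRange 0 (((matrix.getD k []).length : Nat) : Int) 1).foldl
        (fun count j =>
          if PySem.List.pyGetD (PySem.List.pyGetD matrix friend_num []) j 0 == 1
              && PySem.List.pyGetD (matrix.getD k []) j 0 == 1
              && ((k : Int) != friend_num)
              && PySem.List.pyGetD (matrix.getD k []) friend_num 1 == 0
          then count + 1 else count) 0 := by
  set row := matrix.getD k [] with hrow
  set tgt := PySem.List.pyGetD matrix friend_num [] with htgt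
  rw [PySem.List.foldl_count_if]
  by_cases hM : (k : Int) = friend_num ∨ ¬ (PySem.List.pyGetD row friend_num 1 = 0)
  · rw [if_pos hM]
    have hz : (PySem.List.pyRange 0 ((row.length : Nat) : Int) 1).countP
        (fun j => PySem.List.pyGetD tgt j 0 == 1 && PySem.List.pyGetD row j 0 == 1
          && ((k : Int) != friend_num) && PySem.List.pyGetD row friend_num 1 == 0) = 0 := by
      apply List.countP_eq_zero.mpr
      intro j _
      rcases hM with h | h
      · simp [bne, h]
      · simp [h]
    simp [hz]
  · rw [if_neg hM]
    have hkf : ¬ ((k : Int) = friend_num) := fun h => hM (Or.inl h)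
    have hf0 : PySem.List.pyGetD row friend_num 1 = 0 := by
      by_contra h
      exact hM (Or.inr h)
    simp only [zero_add, Nat.cast_inj]
    rw [show PySem.List.enumerate tgt 0
          = (PySem.List.pyRange 0 (PySem.List.len tgt) 1).map
              (fun j => (j, PySem.List.pyGetD tgt j 0)) from
        PySem.List.enumerate_eq_map_pyRange tgt 0,
        List.countP_map]
    have hlen' : ((row.length : Nat) : Int) ≤ PySem.List.len tgt := by
      simp [PySem.List.len]; exact_mod_cast hlen
    rw [PySem.List.pyRange_one_append 0 ((row.length : Nat) : Int) (PySem.List.len tgt)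
          (by positivity) hlen',
        List.countP_append]
    have h2 : (PySem.List.pyRange ((row.length : Nat) : Int) (PySem.List.len tgt) 1).countP
        ((pvColCond row) ∘ (fun j => (j, PySem.List.pyGetD tgt j 0))) = 0 := by
      apply List.countP_eq_zero.mpr
      intro j hj
      rcases PySem.List.mem_pyRange_one.mp hj with ⟨hj1, _⟩
      unfold pvColCond
      simp only [Function.comp_apply]
      have : ¬ (j < (row.length : Int) ∧ PySem.List.pyGetD row j 0 = 1) := by
        intro hc; omega
      simp [this]
    rw [h2, Nat.add_zero]
    apply List.countP_congr
    intro j hj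
    rcases PySem.List.mem_pyRange_one.mp hj with ⟨hj0, hj1⟩
    unfold pvColCond
    simp only [Function.comp_apply]
    have hne : ((k : Int) != friend_num) = true := by simp [bne, hkf]
    have h0 : (PySem.List.pyGetD row friend_num 1 == 0) = true := by simp [hf0]
    rw [hne, h0]
    by_cases ht : PySem.List.pyGetD tgt j 0 = 1 <;>
      by_cases hr : PySem.List.pyGetD row j 0 = 1 <;>
        simp [ht, hr, hj1]

-- ===== VERDICT (by name: the statement is the Claim_ definition above) =====
theorem recommendedfriend_spec : Claim_equal_recommendedfriend := by
  intro matrix friend_num _ hpre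
  obtain ⟨-, -, hrows⟩ := hpre
  unfold Spec_recommendedfriend recommendedfriend recommendedfriend_alt
  simp only []
  set tgt := PySem.List.pyGetD matrix friend_num [] with htgt
  set f : Int → Int := fun i =>
    (PySem.List.pyRange 0 ((PySem.List.pyGetD matrix i []).length : Int) 1).foldl
      (fun count j =>
        if PySem.List.pyGetD tgt j 0 == 1
            && PySem.List.pyGetD (PySem.List.pyGetD matrix i []) j 0 == 1
            && i != friend_num
            && PySem.List.pyGetD (PySem.List.pyGetD matrix i []) friend_num 1 == 0
        then count + 1 else count) 0 with hf
  set scores1 : List Int :=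
    (PySem.List.enumerate tgt 0).foldl
      (fun scores p =>
        if p.2 = 1 then
          (scores.zip matrix).map (fun q =>
            q.1 + (if p.1 < (q.2.length : Int) ∧ PySem.List.pyGetD q.2 p.1 0 = 1 then 1 else 0))
        else scores) (List.replicate matrix.length 0) with hscores1
  have hs1len : scores1.length = matrix.length :=
    pv_scatter_len matrix _ _ (by simp)
  have hml : (PySem.List.pyRange 0 (matrix.length : Int) 1).foldl (fun max_recommend i =>
      max_recommend ++ [f i]) ([] : List Int)
      = (PySem.List.pyRange 0 (matrix.length : Int) 1).map f := by
    rw [PySem.List.foldl_append_singleton_eq_map]; simp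
  rw [hml]
  have hkey : (PySem.List.enumerate (scores1.zip matrix) 0).map (fun q =>
      if q.1 = friend_num ∨ ¬ (PySem.List.pyGetD q.2.2 friend_num 1 = 0) then 0 else q.2.1)
      = (PySem.List.pyRange 0 (matrix.length : Int) 1).map f := by
    apply List.ext_getElem
    · simp [hs1len, PySem.List.length_pyRange_one, PySem.List.length_enumerate]
    · intro k hk1 hk2
      have hkn : k < matrix.length := by
        simp [PySem.List.length_enumerate, hs1len] at hk1
        omega
      have hkz : k < (scores1.zip matrix).length := by
        simp only [List.length_zip, hs1len]
        omega
      rw [List.getElem_map, PySem.List.getElem_enumerate _ _ _ (by simpa using hkz),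
          List.getElem_zip]
      rw [List.getElem_map, PySem.List.getElem_pyRange_one]
      simp only [zero_add]
      have hget : scores1[k] = scores1.getD k 0 := (List.getD_eq_getElem _ _ (by omega)).symm
      have hmk : matrix[k] = matrix.getD k [] := (List.getD_eq_getElem _ _ hkn).symm
      rw [hget, hmk, pv_scatter_getD matrix _ _ (by simp) k hkn]
      have hrep : (List.replicate matrix.length (0 : Int)).getD k 0 = 0 := by
        rw [List.getD_eq_getElem _ _ (by simpa using hkn)]
        simp
      rw [hrep, zero_add]
      have hlenk : (matrix.getD k []).length ≤ tgt.length := by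
        have hmem : (matrix.getD k [], k) ∈ matrix.zipIdx := by
          have hzi : (matrix.zipIdx)[k]'(by simpa using hkn) = (matrix[k], k) := by
            simp [List.getElem_zipIdx]
          rw [← hmk, ← hzi]
          exact List.getElem_mem _
        exact (hrows _ hmem).1
      have hfk : PySem.List.pyGetD matrix ((k : Nat) : Int) [] = matrix.getD k [] := by
        simp [PySem.List.pyGetD_natCast]
      simp only [hf]
      rw [hfk]
      exact pv_col_eq_row matrix friend_num k hlenk
  rw [hkey]
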